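-- pv_equiv track=rewrite | github.com/tomereiss/Pyramid-Game | TomerReiss_ThePyramidGame.py | blue_rule
-- ===== SOURCE A (Python) =====
-- def blue_rule(row_value, col_value, width, height):
--     if row_value == height - 1:
--         return False
--     y = int(width / 2)
--     z = int(width / 2)
--     for x in range(height - 1):
--         if (row_value == x) and (col_value == y or col_value == z):
--             return False
--         y = y + 1
--         z = z - 1
--     return True
-- ===== SOURCE B (Python) =====
-- def blue_rule(row_value, col_value, width, height):
--     if row_value == height - 1:
--         return False
--     half = int(width / 2)
--     on_blue_diagonal = (0 <= row_value < height - 1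
--                         and col_value in (half + row_value, half - row_value))
--     return not on_blue_diagonal
-- ===== Notes on version B (the rewrite author's own statement) =====
-- stated objective: faster
-- what changed: Replaces the O(height) loop carrying two counters with an O(1) closed-form test: the loop condition can only fire at x = row_value, where y = int(width/2) + row_value and z = int(width/2) - row_value.
import Mathlib
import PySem

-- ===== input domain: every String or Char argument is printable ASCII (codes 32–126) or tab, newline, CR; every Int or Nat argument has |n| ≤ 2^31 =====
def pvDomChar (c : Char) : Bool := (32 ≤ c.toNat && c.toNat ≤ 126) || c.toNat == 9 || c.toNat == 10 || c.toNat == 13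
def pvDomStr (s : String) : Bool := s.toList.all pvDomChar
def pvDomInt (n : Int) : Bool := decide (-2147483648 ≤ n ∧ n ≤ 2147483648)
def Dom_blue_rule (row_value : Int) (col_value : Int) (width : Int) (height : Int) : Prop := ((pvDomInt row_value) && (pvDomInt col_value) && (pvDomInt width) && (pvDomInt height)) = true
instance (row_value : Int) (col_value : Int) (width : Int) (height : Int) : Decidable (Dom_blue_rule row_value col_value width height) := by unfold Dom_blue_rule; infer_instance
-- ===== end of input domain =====

-- B replaces A's O(height) loop with an O(1) closed-form test; same return value everywhere.

-- ===== PORT A =====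
-- the for-loop over range(height-1), carrying (y, z); early return False inside
def blueLoopA (row_value : Int) (col_value : Int) : List Int → Int → Int → Bool
  | [], _, _ => true
  | x :: rest, y, z =>
    if row_value == x && (col_value == y || col_value == z) then false
    else blueLoopA row_value col_value rest (y + 1) (z - 1)

-- int(width / 2) truncates toward zero: Int.tdiv (exact on Dom, where width/2 is float-exact)
def blue_rule (row_value : Int) (col_value : Int) (width : Int) (height : Int) : Bool :=
  if row_value == height - 1 then false
  else blueLoopA row_value col_value (PySem.List.pyRange 0 (height - 1) 1) (Int.tdiv width 2) (Int.tdiv width 2)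

-- ===== PORT B =====
-- int(width / 2) → Int.tdiv width 2 (exact on Dom, as in port A)
def blue_rule_alt (row_value : Int) (col_value : Int) (width : Int) (height : Int) : Bool :=
  if row_value == height - 1 then false
  else
    let half := Int.tdiv width 2
    let on_blue_diagonal :=
      decide (0 ≤ row_value) && decide (row_value < height - 1) &&
        (col_value == half + row_value || col_value == half - row_value)
    !on_blue_diagonal

-- ===== PRECONDITION & SPEC =====
def Spec_blue_rule (row_value : Int) (col_value : Int) (width : Int) (height : Int) (out : Bool) : Prop := out = blue_rule_alt row_value col_value width height
instance (row_value : Int) (col_value : Int) (width : Int) (height : Int) (out : Bool) : Decidable (Spec_blue_rule row_value col_value width height out) := by unfold Spec_blue_rule; infer_instance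

-- ===== CLAIM (what is proved, stated in full; the proofs are below) =====
def Claim_equal_blue_rule : Prop := ∀ (row_value : Int) (col_value : Int) (width : Int) (height : Int), Dom_blue_rule row_value col_value width height → Spec_blue_rule row_value col_value width height (blue_rule row_value col_value width height)

-- ===== LEMMAS AND PROOFS =====

-- characterisation of the loop on a consecutive integer range
theorem blueLoopA_pyRange (rv cv : Int) (a b y z : Int) :
    blueLoopA rv cv (PySem.List.pyRange a b 1) y z
      = !(decide (a ≤ rv ∧ rv < b ∧ (cv = y + (rv - a) ∨ cv = z - (rv - a)))) := by
  by_cases hab : b ≤ a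
  · rw [PySem.List.pyRange_one_eq_nil hab]
    simp [blueLoopA]; omega
  · push Not at hab
    rw [PySem.List.pyRange_one_cons hab, blueLoopA,
        blueLoopA_pyRange rv cv (a + 1) b (y + 1) (z - 1)]
    by_cases hg : (rv == a && (cv == y || cv == z)) = true
    · simp only [hg, if_true]
      simp only [beq_iff_eq, Bool.and_eq_true, Bool.or_eq_true] at hg
      obtain ⟨h1, h2⟩ := hg
      have hmain : (a ≤ rv ∧ rv < b ∧ (cv = y + (rv - a) ∨ cv = z - (rv - a))) := by
        refine ⟨by omega, by omega, ?_⟩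
        rcases h2 with h | h <;> [left; right] <;> omega
      simp [hmain]
    · have hg' : rv = a → cv ≠ y ∧ cv ≠ z := by
        intro hra
        constructor <;> intro hcv <;> apply hg <;> simp [hra, hcv]
      simp only [Bool.not_eq_true] at hg
      simp only [hg, Bool.false_eq_true, if_false]
      congr 1
      simp only [decide_eq_decide]
      constructor
      · rintro ⟨h1, h2, h3⟩
        exact ⟨by omega, by omega, by rcases h3 with h | h <;> [left; right] <;> omega⟩
      · rintro ⟨h1, h2, h3⟩
        refine ⟨?_, by omega, ?_⟩
        · rcases Int.lt_or_le a rv with h | h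
          · omega
          · exfalso
            have hra : rv = a := by omega
            rcases h3 with hh | hh
            · exact (hg' hra).1 (by omega)
            · exact (hg' hra).2 (by omega)
        · rcases h3 with h | h <;> [left; right] <;> omega
termination_by (b - a).toNat
decreasing_by omega

-- ===== VERDICT (by name: the statement is the Claim_ definition above) =====
theorem blue_rule_spec : Claim_equal_blue_rule := by
  intro rv cv w h _
  unfold Spec_blue_rule blue_rule blue_rule_alt
  by_cases hl : rv = h - 1
  · simp [hl]
  · have hl' : (rv == h - 1) = false := by simp [hl]
    simp only [hl', Bool.false_eq_true, if_false]
    rw [blueLoopA_pyRange]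
    simp only [sub_zero]
    by_cases hp : 0 ≤ rv ∧ rv < h - 1 ∧ (cv = Int.tdiv w 2 + rv ∨ cv = Int.tdiv w 2 - rv)
    · obtain ⟨h1, h2, h3⟩ := hp
      rcases h3 with h3 | h3 <;> simp [h1, h2, h3]
    · have hd : decide (0 ≤ rv ∧ rv < h - 1 ∧ (cv = Int.tdiv w 2 + rv ∨ cv = Int.tdiv w 2 - rv)) = false := by
        simp only [decide_eq_false_iff_not]; exact hp
      have he : (decide (0 ≤ rv) && decide (rv < h - 1) &&
          (cv == Int.tdiv w 2 + rv || cv == Int.tdiv w 2 - rv)) = false := by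
        simp only [Bool.and_eq_false_iff, Bool.or_eq_false_iff, decide_eq_false_iff_not,
          beq_eq_false_iff_ne, ne_eq]
        tauto
      rw [hd, he]
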